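-- pv_equiv track=rewrite | github.com/Banbury-inc/NeuraNet | Multiple_Knapsack_Algorithm/algorithms/knapsack_just_to_store.py | multiple_knapsack_with_priority
-- ===== SOURCE A (Python) =====
-- def multiple_knapsack_with_priority(files, devices, priorities):
--     num_files = len(files)
--     num_devices = len(devices)
--
--     # Create a 2D array to store the intermediate results of subproblems
--     dp = [[0 for _ in range(num_devices + 1)] for _ in range(num_files + 1)]
--
--     # Dynamic programming computation
--     for i in range(1, num_files + 1):
--         file_size = files[i - 1]
--         file_priority = priorities[i - 1]
--         for j in range(1, num_devices + 1):
--             device_capacity = devices[j - 1]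
--             if file_size <= device_capacity and dp[i - 1][j - 1] + file_priority > dp[i - 1][j]:
--                 dp[i][j] = dp[i - 1][j - 1] + file_priority
--             else:
--                 dp[i][j] = dp[i - 1][j]
--
--     # Backtracking to find the optimal allocation with priorities
--     optimal_allocation = []
--     i, j = num_files, num_devices
--     while i > 0 and j > 0:
--         file_size = files[i - 1]
--         file_priority = priorities[i - 1]
--         if file_size <= devices[j - 1] and dp[i][j] != dp[i - 1][j]:
--             optimal_allocation.append((i - 1, j - 1))  # (file index, device index)
--             i -= 1
--             j -= 1
--         else:
--             i -= 1
--
--     # Optimal total storage with priority-based allocation and the allocation strategy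
--     total_storage = dp[num_files][num_devices]
--     return total_storage, optimal_allocation
-- ===== SOURCE B (Python) =====
-- def multiple_knapsack_with_priority(files, devices, priorities):
--     m = len(devices)
--
--     # Single forward pass with a rolling 1D value row, updated right-to-left in
--     # place (classic knapsack space reduction).  The optimal allocation is carried
--     # alongside via parent pointers into a flat arena of recorded picks, so no
--     # 2D table is kept and no backtracking walk over DP comparisons is needed.
--     vals = [0] * (m + 1)
--     sols = [-1] * (m + 1)  # sols[j]: arena index of the newest pick on the best chain, -1 = none
--     pick_f = []            # arena: file index of each recorded pick
--     pick_d = []            # arena: device index of each recorded pick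
--     parent = []            # arena: index of the previous pick on the same chain
--     i = 1
--     for f, p in zip(files, priorities):
--         for j in range(m, 0, -1):
--             if f <= devices[j - 1] and vals[j - 1] + p > vals[j]:
--                 vals[j] = vals[j - 1] + p
--                 pick_f.append(i - 1)
--                 pick_d.append(j - 1)
--                 parent.append(sols[j - 1])
--                 sols[j] = len(parent) - 1
--         i += 1
--
--     allocation = []
--     k = sols[m]
--     while k != -1:
--         allocation.append((pick_f[k], pick_d[k]))
--         k = parent[k]
--     return vals[m], allocation
-- ===== Notes on version B (the rewrite author's own statement) =====
-- stated objective: alternative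
-- what changed: B replaces A's full (n+1)x(m+1) table plus a separate backtracking walk by a single forward pass: one rolling 1D value row updated right-to-left in place (the classic knapsack space reduction), with the optimal allocation carried alongside as shared cons-cells, so there is no 2D table and no backtracking phase re-deciding via dp comparisons.
import Mathlib
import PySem

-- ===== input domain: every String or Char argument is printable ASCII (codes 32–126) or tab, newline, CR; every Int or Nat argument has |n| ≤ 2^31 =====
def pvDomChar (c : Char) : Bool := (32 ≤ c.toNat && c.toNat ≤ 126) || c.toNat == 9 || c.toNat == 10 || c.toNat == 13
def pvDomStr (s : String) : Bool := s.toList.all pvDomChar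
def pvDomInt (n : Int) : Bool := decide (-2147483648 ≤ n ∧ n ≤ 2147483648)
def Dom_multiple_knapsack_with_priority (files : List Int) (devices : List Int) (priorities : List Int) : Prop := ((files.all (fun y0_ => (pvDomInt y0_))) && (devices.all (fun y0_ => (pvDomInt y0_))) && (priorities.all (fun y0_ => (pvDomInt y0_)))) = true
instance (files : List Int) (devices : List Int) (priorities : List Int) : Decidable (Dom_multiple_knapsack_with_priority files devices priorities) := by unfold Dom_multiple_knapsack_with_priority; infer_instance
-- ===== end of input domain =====

-- B replaces A's full 2D table + separate backtracking walk by one forward pass with a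
-- rolling 1D row updated right-to-left in place, carrying the allocation as shared cons-cells.

-- ===== PORT A =====
-- one iteration of A's outer loop: builds dp row i (entry j=0 stays 0) from the previous row
def pvDpRowA (fs fp : Int) (devices : List Int) (prev : List Int) : List Int :=
  (PySem.List.pyRange 1 ((devices.length : Int) + 1) 1).foldl
    (fun row j =>
      row ++ [if fs ≤ PySem.List.pyGetD devices (j - 1) 0 ∧
                 PySem.List.pyGetD prev (j - 1) 0 + fp > PySem.List.pyGetD prev j 0
              then PySem.List.pyGetD prev (j - 1) 0 + fp
              else PySem.List.pyGetD prev j 0])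
    [0]

-- A's table fill: rows appended in order, each computed from dp[i-1]
def pvDpA (files devices priorities : List Int) : List (List Int) :=
  (PySem.List.pyRange 1 ((files.length : Int) + 1) 1).foldl
    (fun rows i =>
      rows ++ [pvDpRowA (PySem.List.pyGetD files (i - 1) 0)
                        (PySem.List.pyGetD priorities (i - 1) 0)
                        devices
                        (PySem.List.pyGetD rows (i - 1) [])])
    [List.replicate (devices.length + 1) 0]

-- A's backtracking while-loop (i, j are the Python loop counters)
def pvBackA (files devices : List Int) (dp : List (List Int)) :
    Nat → Nat → List (Int × Int) → List (Int × Int)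
  | 0, _, acc => acc
  | _ + 1, 0, acc => acc
  | i + 1, j + 1, acc =>
    if PySem.List.pyGetD files (i : Int) 0 ≤ PySem.List.pyGetD devices (j : Int) 0 ∧
       PySem.List.pyGetD (PySem.List.pyGetD dp ((i : Int) + 1) []) ((j : Int) + 1) 0 ≠
         PySem.List.pyGetD (PySem.List.pyGetD dp (i : Int) []) ((j : Int) + 1) 0
    then pvBackA files devices dp i j (acc ++ [((i : Int), (j : Int))])
    else pvBackA files devices dp i (j + 1) acc

def multiple_knapsack_with_priority (files : List Int) (devices : List Int) (priorities : List Int) : Int × (List (Int × Int)) :=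
  let dp := pvDpA files devices priorities
  let alloc := pvBackA files devices dp files.length devices.length []
  (PySem.List.pyGetD (PySem.List.pyGetD dp ((files.length : Int)) []) ((devices.length : Int)) 0, alloc)

-- ===== PORT B =====
-- B's rolling state: the 1D value row, per-column chain heads, and the pick arena
structure PvStB where
  vals : List Int
  sols : List Int
  pf : List Int
  pd : List Int
  par : List Int
deriving Repr

-- body of B's inner loop: in-place update of vals[j]/sols[j] plus three arena appends
-- (j is always in 1..len(devices), so List.set at j.toNat is exact for the Python assignment)
def pvColStepB (ds : List Int) (f p i : Int) (st : PvStB) (j : Int) : PvStB :=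
  if f ≤ PySem.List.pyGetD ds (j - 1) 0 ∧
     PySem.List.pyGetD st.vals (j - 1) 0 + p > PySem.List.pyGetD st.vals j 0 then
    let par' := st.par ++ [PySem.List.pyGetD st.sols (j - 1) 0]
    { vals := st.vals.set j.toNat (PySem.List.pyGetD st.vals (j - 1) 0 + p),
      sols := st.sols.set j.toNat ((par'.length : Int) - 1),
      pf := st.pf ++ [i - 1],
      pd := st.pd ++ [j - 1],
      par := par' }
  else st

-- B's outer loop over zip(files, priorities) with the counter i, running the
-- right-to-left inner loop 'for j in range(m, 0, -1)'
def pvRunB (files devices priorities : List Int) : PvStB × Int :=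
  (files.zip priorities).foldl
    (fun acc fp =>
      ((PySem.List.pyRange ((devices.length : Int)) 0 (-1)).foldl
         (pvColStepB devices fp.1 fp.2 acc.2) acc.1,
       acc.2 + 1))
    ({ vals := List.replicate (devices.length + 1) (0 : Int),
       sols := List.replicate (devices.length + 1) (-1 : Int),
       pf := [], pd := [], par := [] }, 1)

-- B's final while-loop following parent pointers (the fuel only makes the
-- recursion structural; parent indices strictly decrease, so it is never exhausted)
def pvWhileB (pf pd par : List Int) : Nat → Int → List (Int × Int) → List (Int × Int)
  | 0, _, acc => acc
  | fuel + 1, k, acc =>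
    if k ≠ -1 then
      pvWhileB pf pd par fuel (PySem.List.pyGetD par k 0)
        (acc ++ [(PySem.List.pyGetD pf k 0, PySem.List.pyGetD pd k 0)])
    else acc

def multiple_knapsack_with_priority_alt (files : List Int) (devices : List Int) (priorities : List Int) : Int × (List (Int × Int)) :=
  let st := (pvRunB files devices priorities).1
  (PySem.List.pyGetD st.vals ((devices.length : Int)) 0,
   pvWhileB st.pf st.pd st.par (st.par.length + 1)
     (PySem.List.pyGetD st.sols ((devices.length : Int)) 0) [])

-- ===== PRECONDITION & SPEC =====
-- Pre_ excludes exactly the inputs where Python A raises IndexError: fewer priorities than files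
-- (A reads priorities[i-1] for every file index i).
def Pre_multiple_knapsack_with_priority (files : List Int) (devices : List Int) (priorities : List Int) : Prop :=
  files.length ≤ priorities.length
instance (files : List Int) (devices : List Int) (priorities : List Int) : Decidable (Pre_multiple_knapsack_with_priority files devices priorities) := by unfold Pre_multiple_knapsack_with_priority; infer_instance

def pvWitness_multiple_knapsack_with_priority : List Int × List Int × List Int :=
  ([5, 3], [10, 4], [2, 1])

def Spec_multiple_knapsack_with_priority (files : List Int) (devices : List Int) (priorities : List Int) (out : Int × (List (Int × Int))) : Prop := out = multiple_knapsack_with_priority_alt files devices priorities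
instance (files : List Int) (devices : List Int) (priorities : List Int) (out : Int × (List (Int × Int))) : Decidable (Spec_multiple_knapsack_with_priority files devices priorities out) := by unfold Spec_multiple_knapsack_with_priority; infer_instance

-- ===== CLAIM (what is proved, stated in full; the proofs are below) =====
def Claim_equal_multiple_knapsack_with_priority : Prop := ∀ (files : List Int) (devices : List Int) (priorities : List Int), Dom_multiple_knapsack_with_priority files devices priorities → Pre_multiple_knapsack_with_priority files devices priorities → Spec_multiple_knapsack_with_priority files devices priorities (multiple_knapsack_with_priority files devices priorities)

-- ===== LEMMAS AND PROOFS =====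

-- the DP value dp[i][j], as a recursive function
def pvBest (fs ds ps : List Int) : Nat → Nat → Int
  | 0, _ => 0
  | _ + 1, 0 => 0
  | i + 1, j + 1 =>
    if fs.getD i 0 ≤ ds.getD j 0 ∧ pvBest fs ds ps i j + ps.getD i 0 > pvBest fs ds ps i (j + 1)
    then pvBest fs ds ps i j + ps.getD i 0
    else pvBest fs ds ps i (j + 1)

theorem pvBest_zero (fs ds ps : List Int) (j : Nat) : pvBest fs ds ps 0 j = 0 := by
  cases j <;> simp [pvBest]

theorem pvBest_zero' (fs ds ps : List Int) (t : Nat) : pvBest fs ds ps t 0 = 0 := by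
  cases t <;> simp [pvBest]

-- the optimal allocation read off from state (i, j), newest pick first
def pvPath (fs ds ps : List Int) : Nat → Nat → List (Int × Int)
  | 0, _ => []
  | _ + 1, 0 => []
  | i + 1, j + 1 =>
    if fs.getD i 0 ≤ ds.getD j 0 ∧ pvBest fs ds ps i j + ps.getD i 0 > pvBest fs ds ps i (j + 1)
    then ((i : Int), (j : Int)) :: pvPath fs ds ps i j
    else pvPath fs ds ps i (j + 1)

theorem pvPath_zero (fs ds ps : List Int) (j : Nat) : pvPath fs ds ps 0 j = [] := by
  cases j <;> simp [pvPath]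

theorem pvPath_zero' (fs ds ps : List Int) (t : Nat) : pvPath fs ds ps t 0 = [] := by
  cases t <;> simp [pvPath]

-- ------- A side: the table holds pvBest -------

def pvRowR (fs ds ps : List Int) : Nat → List Int
  | 0 => List.replicate (ds.length + 1) 0
  | t + 1 => pvDpRowA (fs.getD t 0) (ps.getD t 0) ds (pvRowR fs ds ps t)

theorem pvDpRowA_char (fs fp : Int) (ds prev : List Int) :
    pvDpRowA fs fp ds prev =
      0 :: (List.range ds.length).map (fun k =>
        if fs ≤ ds.getD k 0 ∧ prev.getD k 0 + fp > prev.getD (k + 1) 0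
        then prev.getD k 0 + fp else prev.getD (k + 1) 0) := by
  unfold pvDpRowA
  rw [PySem.List.pyRange_one]
  have h1 : ((ds.length : Int) + 1 - 1).toNat = ds.length := by omega
  rw [h1, List.foldl_map, PySem.List.foldl_append_singleton_eq_map]
  simp only [List.singleton_append, List.cons.injEq, true_and]
  apply List.map_congr_left
  intro k hk
  have e1 : (1 : Int) + (k : Int) - 1 = (k : Int) := by ring
  have e3 : PySem.List.pyGetD prev (1 + (k : Int)) 0 = prev.getD (k + 1) 0 := by
    rw [show (1 + (k : Int)) = ((k + 1 : Nat) : Int) by push_cast; ring, PySem.List.pyGetD_natCast]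
  rw [e1]
  simp [e3, PySem.List.pyGetD_natCast]

theorem pvDpA_aux (fs ds ps : List Int) (t : Nat) :
    (PySem.List.pyRange 1 ((t : Int) + 1) 1).foldl
      (fun rows i =>
        rows ++ [pvDpRowA (PySem.List.pyGetD fs (i - 1) 0)
                          (PySem.List.pyGetD ps (i - 1) 0)
                          ds
                          (PySem.List.pyGetD rows (i - 1) [])])
      [List.replicate (ds.length + 1) 0]
    = (List.range (t + 1)).map (pvRowR fs ds ps) := by
  induction t with
  | zero =>
    rw [PySem.List.pyRange_one_eq_nil (by omega)]
    simp [pvRowR]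
  | succ t ih =>
    have hsplit : PySem.List.pyRange 1 (((t + 1 : Nat) : Int) + 1) 1
        = PySem.List.pyRange 1 ((t : Int) + 1) 1 ++ [(t : Int) + 1] := by
      rw [show (((t + 1 : Nat) : Int) + 1) = ((t : Int) + 1) + 1 by push_cast; ring]
      exact PySem.List.pyRange_one_succ_right (by omega)
    rw [hsplit, List.foldl_append, ih]
    simp only [List.foldl_cons, List.foldl_nil]
    have e1 : (t : Int) + 1 - 1 = ((t : Nat) : Int) := by ring
    rw [e1, PySem.List.pyGetD_natCast, PySem.List.pyGetD_natCast, PySem.List.pyGetD_natCast]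
    have e2 : ((List.range (t + 1)).map (pvRowR fs ds ps)).getD t [] = pvRowR fs ds ps t := by
      rw [List.getD_eq_getElem _ _ (by simp)]
      simp
    rw [e2]
    conv_rhs => rw [List.range_succ]
    simp [pvRowR, List.getD]

theorem pvDpA_char (fs ds ps : List Int) :
    pvDpA fs ds ps = (List.range (fs.length + 1)).map (pvRowR fs ds ps) := by
  unfold pvDpA
  exact pvDpA_aux fs ds ps fs.length

theorem pvRowR_getD (fs ds ps : List Int) (t : Nat) :
    ∀ j : Nat, j ≤ ds.length → (pvRowR fs ds ps t).getD j 0 = pvBest fs ds ps t j := by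
  induction t with
  | zero =>
    intro j hj
    simp [pvRowR, pvBest_zero, List.getD]
  | succ t ih =>
    intro j hj
    rw [pvRowR, pvDpRowA_char]
    match j with
    | 0 => simp [pvBest]
    | k + 1 =>
      have hk : k < ds.length := by omega
      have : ((List.range ds.length).map (fun k =>
          if fs.getD t 0 ≤ ds.getD k 0 ∧ (pvRowR fs ds ps t).getD k 0 + ps.getD t 0 > (pvRowR fs ds ps t).getD (k + 1) 0
          then (pvRowR fs ds ps t).getD k 0 + ps.getD t 0 else (pvRowR fs ds ps t).getD (k + 1) 0)).getD k 0
          = (if fs.getD t 0 ≤ ds.getD k 0 ∧ (pvRowR fs ds ps t).getD k 0 + ps.getD t 0 > (pvRowR fs ds ps t).getD (k + 1) 0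
          then (pvRowR fs ds ps t).getD k 0 + ps.getD t 0 else (pvRowR fs ds ps t).getD (k + 1) 0) := by
        rw [List.getD_eq_getElem _ _ (by simpa using hk)]
        simp
      simp only [List.getD_cons_succ]
      rw [this, ih k (by omega), ih (k+1) hj, pvBest]

theorem pvDpA_getD (fs ds ps : List Int) (i j : Nat)
    (hi : i ≤ fs.length) (hj : j ≤ ds.length) :
    PySem.List.pyGetD (PySem.List.pyGetD (pvDpA fs ds ps) (i : Int) []) (j : Int) 0 =
      pvBest fs ds ps i j := by
  have hrow : ((List.range (fs.length + 1)).map (pvRowR fs ds ps)).getD i [] = pvRowR fs ds ps i := by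
    rw [List.getD_eq_getElem _ _ (by simp only [List.length_map, List.length_range]; omega)]
    simp
  simp only [PySem.List.pyGetD_natCast, pvDpA_char]
  rw [hrow]
  exact pvRowR_getD fs ds ps i j hj

-- the walk's inequality test equals the fill's take condition
theorem pvTake_iff (fs ds ps : List Int) (i j : Nat) :
    pvBest fs ds ps (i + 1) (j + 1) ≠ pvBest fs ds ps i (j + 1) ↔
      (fs.getD i 0 ≤ ds.getD j 0 ∧
       pvBest fs ds ps i j + ps.getD i 0 > pvBest fs ds ps i (j + 1)) := by
  have h : pvBest fs ds ps (i + 1) (j + 1) =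
      if fs.getD i 0 ≤ ds.getD j 0 ∧ pvBest fs ds ps i j + ps.getD i 0 > pvBest fs ds ps i (j + 1)
      then pvBest fs ds ps i j + ps.getD i 0
      else pvBest fs ds ps i (j + 1) := rfl
  rw [h]
  split_ifs with hc
  · constructor
    · intro _; exact hc
    · intro _; omega
  · exact ⟨fun h => absurd rfl h, fun h => absurd h hc⟩

-- A's backtracking produces pvPath
theorem pvBackA_eq_path (fs ds ps : List Int) :
    ∀ (i j : Nat) (acc : List (Int × Int)), i ≤ fs.length → j ≤ ds.length →
      pvBackA fs ds (pvDpA fs ds ps) i j acc = acc ++ pvPath fs ds ps i j := by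
  intro i
  induction i with
  | zero => intro j acc _ _; cases j <;> simp [pvBackA, pvPath]
  | succ i ih =>
    intro j acc hi hj
    cases j with
    | zero => simp [pvBackA, pvPath]
    | succ j =>
      rw [pvBackA]
      have eA1 : PySem.List.pyGetD (PySem.List.pyGetD (pvDpA fs ds ps) ((i : Int) + 1) []) ((j : Int) + 1) 0
          = pvBest fs ds ps (i + 1) (j + 1) := by
        rw [show ((i : Int) + 1) = ((i + 1 : Nat) : Int) by push_cast; ring,
            show ((j : Int) + 1) = ((j + 1 : Nat) : Int) by push_cast; ring]
        exact pvDpA_getD fs ds ps (i + 1) (j + 1) hi hj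
      have eA2 : PySem.List.pyGetD (PySem.List.pyGetD (pvDpA fs ds ps) ((i : Int)) []) ((j : Int) + 1) 0
          = pvBest fs ds ps i (j + 1) := by
        rw [show ((j : Int) + 1) = ((j + 1 : Nat) : Int) by push_cast; ring]
        exact pvDpA_getD fs ds ps i (j + 1) (by omega) hj
      rw [eA1, eA2, PySem.List.pyGetD_natCast, PySem.List.pyGetD_natCast]
      have hpath : pvPath fs ds ps (i + 1) (j + 1) =
          if fs.getD i 0 ≤ ds.getD j 0 ∧ pvBest fs ds ps i j + ps.getD i 0 > pvBest fs ds ps i (j + 1)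
          then ((i : Int), (j : Int)) :: pvPath fs ds ps i j
          else pvPath fs ds ps i (j + 1) := rfl
      by_cases hc : fs.getD i 0 ≤ ds.getD j 0 ∧
          pvBest fs ds ps i j + ps.getD i 0 > pvBest fs ds ps i (j + 1)
      · rw [if_pos (by exact ⟨hc.1, (pvTake_iff fs ds ps i j).mpr hc⟩),
            ih j (acc ++ [((i : Int), (j : Int))]) (by omega) (by omega),
            hpath, if_pos hc]
        simp
      · have hne : ¬ (fs.getD i 0 ≤ ds.getD j 0 ∧
            pvBest fs ds ps (i + 1) (j + 1) ≠ pvBest fs ds ps i (j + 1)) := by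
          intro h
          exact hc ⟨h.1, ((pvTake_iff fs ds ps i j).mp h.2).2⟩
        rw [if_neg hne, ih (j + 1) acc (by omega) hj, hpath, if_neg hc]

-- ------- B side: rolling-row + arena invariant -------

theorem pv_getD_set_eq {α : Type} (xs : List α) (k : Nat) (v d : α) (h : k < xs.length) :
    (xs.set k v).getD k d = v := by
  rw [List.getD_eq_getElem _ _ (by simpa using h)]
  simp

theorem pv_getD_set_ne {α : Type} (xs : List α) (k : Nat) (v d : α) (j : Nat) (h : j ≠ k) :
    (xs.set k v).getD j d = xs.getD j d := by
  by_cases hj : j < xs.length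
  · rw [List.getD_eq_getElem _ _ (by simpa using hj), List.getD_eq_getElem _ _ hj]
    exact List.getElem_set_ne (by omega) _
  · rw [List.getD_eq_default _ _ (by simpa using hj), List.getD_eq_default _ _ (by omega)]

theorem pv_pyGetD_append_left (xs ys : List Int) (k : Int) (d : Int)
    (h0 : 0 ≤ k) (h : k < (xs.length : Int)) :
    PySem.List.pyGetD (xs ++ ys) k d = PySem.List.pyGetD xs k d := by
  have hk : k.toNat < xs.length := by omega
  rw [show k = ((k.toNat : Nat) : Int) by omega,
      PySem.List.pyGetD_natCast, PySem.List.pyGetD_natCast,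
      List.getD_eq_getElem _ _ (by simp; omega), List.getD_eq_getElem _ _ hk]
  exact List.getElem_append_left _

theorem pv_pyGetD_concat_last (xs : List Int) (v d : Int) :
    PySem.List.pyGetD (xs ++ [v]) ((xs.length : Int)) d = v := by
  rw [PySem.List.pyGetD_natCast, List.getD_eq_getElem _ _ (by simp)]
  simp

-- the parent-pointer chain starting at k spells out exactly the list L
def pvChainOK (pf pd par : List Int) : Int → List (Int × Int) → Prop
  | k, [] => k = -1
  | k, e :: rest => 0 ≤ k ∧ k < (par.length : Int) ∧
      PySem.List.pyGetD pf k 0 = e.1 ∧ PySem.List.pyGetD pd k 0 = e.2 ∧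
      PySem.List.pyGetD par k 0 < k ∧
      pvChainOK pf pd par (PySem.List.pyGetD par k 0) rest

theorem pvChainOK_head_lt (pf pd par : List Int) (k : Int) (L : List (Int × Int))
    (h : pvChainOK pf pd par k L) : k < (par.length : Int) := by
  cases L with
  | nil => rw [show k = -1 from h]; omega
  | cons e rest => exact h.2.1

theorem pvChainOK_mono (pf pd par : List Int) (a b c : Int)
    (hpf : pf.length = par.length) (hpd : pd.length = par.length) :
    ∀ (k : Int) (L : List (Int × Int)), pvChainOK pf pd par k L →
      pvChainOK (pf ++ [a]) (pd ++ [b]) (par ++ [c]) k L := by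
  intro k L
  induction L generalizing k with
  | nil => intro h; exact h
  | cons e rest ih =>
    intro h
    obtain ⟨h0, h1, h2, h3, h4, h5⟩ := h
    refine ⟨h0, by simp; omega, ?_, ?_, ?_, ?_⟩
    · rw [pv_pyGetD_append_left _ _ _ _ h0 (by omega)]; exact h2
    · rw [pv_pyGetD_append_left _ _ _ _ h0 (by omega)]; exact h3
    · rw [pv_pyGetD_append_left _ _ _ _ h0 h1]; exact h4
    · rw [pv_pyGetD_append_left _ _ _ _ h0 h1]; exact ih _ h5

theorem pvChainOK_len (pf pd par : List Int) :
    ∀ (L : List (Int × Int)) (k : Int), pvChainOK pf pd par k L →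
      (L.length : Int) ≤ k + 1 := by
  intro L
  induction L with
  | nil => intro k h; rw [h]; simp
  | cons e rest ih =>
    intro k h
    obtain ⟨h0, h1, h2, h3, h4, h5⟩ := h
    have := ih _ h5
    simp only [List.length_cons]
    push_cast
    omega

theorem pvWhileB_eq (pf pd par : List Int) :
    ∀ (L : List (Int × Int)) (k : Int), pvChainOK pf pd par k L →
      ∀ (fuel : Nat) (acc : List (Int × Int)), L.length < fuel →
        pvWhileB pf pd par fuel k acc = acc ++ L := by
  intro L
  induction L with
  | nil =>
    intro k h fuel acc hf
    match fuel with
    | f + 1 =>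
      rw [pvWhileB, if_neg (by rw [show k = -1 from h]; simp)]
      simp
  | cons e rest ih =>
    intro k h fuel acc hf
    obtain ⟨h0, h1, h2, h3, h4, h5⟩ := h
    match fuel with
    | f + 1 =>
      rw [pvWhileB, if_pos (by omega), h2, h3,
          ih _ h5 f _ (by simpa using hf)]
      simp

-- state of B's row update for file t while columns > k are already updated
def pvMixB (fs ds ps : List Int) (t k : Nat) (st : PvStB) : Prop :=
  st.vals.length = ds.length + 1 ∧ st.sols.length = ds.length + 1 ∧
  st.pf.length = st.par.length ∧ st.pd.length = st.par.length ∧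
  (∀ j : Nat, j ≤ k → st.vals.getD j 0 = pvBest fs ds ps t j ∧
      pvChainOK st.pf st.pd st.par (st.sols.getD j 0) (pvPath fs ds ps t j)) ∧
  (∀ j : Nat, k < j → j ≤ ds.length → st.vals.getD j 0 = pvBest fs ds ps (t + 1) j ∧
      pvChainOK st.pf st.pd st.par (st.sols.getD j 0) (pvPath fs ds ps (t + 1) j))

theorem pvColStepB_mix (fs ds ps : List Int) (t c : Nat) (hc : c < ds.length)
    (st : PvStB) (h : pvMixB fs ds ps t (c + 1) st) :
    pvMixB fs ds ps t c (pvColStepB ds (fs.getD t 0) (ps.getD t 0) ((t : Int) + 1) st ((c : Int) + 1)) := by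
  obtain ⟨hl1, hl2, hl3, hl4, hold, hnew⟩ := h
  unfold pvColStepB
  have e1 : ((c : Int) + 1) - 1 = (c : Int) := by ring
  have e2 : ((c : Int) + 1).toNat = c + 1 := by omega
  have e3 : ((t : Int) + 1) - 1 = (t : Int) := by ring
  rw [e1]
  have hv1 : PySem.List.pyGetD st.vals (c : Int) 0 = pvBest fs ds ps t c := by
    rw [PySem.List.pyGetD_natCast]; exact (hold c (by omega)).1
  have hv2 : PySem.List.pyGetD st.vals ((c : Int) + 1) 0 = pvBest fs ds ps t (c + 1) := by
    rw [show ((c : Int) + 1) = ((c + 1 : Nat) : Int) by push_cast; ring, PySem.List.pyGetD_natCast]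
    exact (hold (c + 1) le_rfl).1
  have hs1 : PySem.List.pyGetD st.sols (c : Int) 0 = st.sols.getD c 0 := by
    rw [PySem.List.pyGetD_natCast]
  have hchainc := (hold c (by omega)).2
  have hd : PySem.List.pyGetD ds (c : Int) 0 = ds.getD c 0 := by
    rw [PySem.List.pyGetD_natCast]
  rw [hv1, hv2, hs1, hd, e2, e3]
  have hbest : pvBest fs ds ps (t + 1) (c + 1) =
      if fs.getD t 0 ≤ ds.getD c 0 ∧ pvBest fs ds ps t c + ps.getD t 0 > pvBest fs ds ps t (c + 1)
      then pvBest fs ds ps t c + ps.getD t 0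
      else pvBest fs ds ps t (c + 1) := rfl
  have hpath : pvPath fs ds ps (t + 1) (c + 1) =
      if fs.getD t 0 ≤ ds.getD c 0 ∧ pvBest fs ds ps t c + ps.getD t 0 > pvBest fs ds ps t (c + 1)
      then ((t : Int), (c : Int)) :: pvPath fs ds ps t c
      else pvPath fs ds ps t (c + 1) := rfl
  split_ifs with hcond
  · have hheadlt : st.sols.getD c 0 < (st.par.length : Int) :=
      pvChainOK_head_lt _ _ _ _ _ hchainc
    have hlen' : ((st.par ++ [st.sols.getD c 0]).length : Int) - 1 = (st.par.length : Int) := by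
      simp
    refine ⟨by simpa using hl1, by simpa using hl2, by simp [hl3], by simp [hl4], ?_, ?_⟩
    · intro j hj
      constructor
      · rw [pv_getD_set_ne _ _ _ _ _ (by omega)]; exact (hold j (by omega)).1
      · rw [pv_getD_set_ne _ _ _ _ _ (by omega)]
        exact pvChainOK_mono _ _ _ _ _ _ hl3 hl4 _ _ (hold j (by omega)).2
    · intro j hj1 hj2
      rcases Nat.eq_or_lt_of_le (by omega : c + 1 ≤ j) with hj | hj
      · subst hj
        constructor
        · rw [pv_getD_set_eq _ _ _ _ (by omega), hbest, if_pos hcond]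
        · rw [pv_getD_set_eq _ _ _ _ (by omega), hlen', hpath, if_pos hcond]
          refine ⟨by omega, by simp, ?_, ?_, ?_, ?_⟩
          · rw [show (st.par.length : Int) = ((st.pf.length : Nat) : Int) by simp [hl3]]
            rw [pv_pyGetD_concat_last]
          · rw [show (st.par.length : Int) = ((st.pd.length : Nat) : Int) by simp [hl4]]
            rw [pv_pyGetD_concat_last]
          · rw [pv_pyGetD_concat_last]
            exact hheadlt
          · rw [pv_pyGetD_concat_last]
            exact pvChainOK_mono _ _ _ _ _ _ hl3 hl4 _ _ hchainc
      · constructor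
        · rw [pv_getD_set_ne _ _ _ _ _ (by omega)]; exact (hnew j (by omega) hj2).1
        · rw [pv_getD_set_ne _ _ _ _ _ (by omega)]
          exact pvChainOK_mono _ _ _ _ _ _ hl3 hl4 _ _ (hnew j (by omega) hj2).2
  · refine ⟨hl1, hl2, hl3, hl4, ?_, ?_⟩
    · intro j hj; exact hold j (by omega)
    · intro j hj1 hj2
      rcases Nat.eq_or_lt_of_le (by omega : c + 1 ≤ j) with hj | hj
      · subst hj
        refine ⟨?_, ?_⟩
        · rw [hbest, if_neg hcond]; exact (hold (c + 1) le_rfl).1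
        · have := (hold (c + 1) le_rfl).2
          rw [hpath, if_neg hcond]
          exact this
      · exact hnew j (by omega) hj2

theorem pvRowB_mix (fs ds ps : List Int) (t : Nat) :
    ∀ (c : Nat), c ≤ ds.length → ∀ st, pvMixB fs ds ps t c st →
      pvMixB fs ds ps t 0
        ((PySem.List.pyRange ((c : Nat) : Int) 0 (-1)).foldl
          (pvColStepB ds (fs.getD t 0) (ps.getD t 0) ((t : Int) + 1)) st) := by
  intro c
  induction c with
  | zero =>
    intro _ st h
    rw [PySem.List.pyRange_neg_one_eq_nil (by omega)]
    simpa using h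
  | succ c ih =>
    intro hc st h
    have hsplit : PySem.List.pyRange (((c + 1 : Nat)) : Int) 0 (-1)
        = ((c : Int) + 1) :: PySem.List.pyRange ((c : Int)) 0 (-1) := by
      rw [show (((c + 1 : Nat)) : Int) = (c : Int) + 1 by push_cast; ring]
      rw [PySem.List.pyRange_neg_one_cons (by omega)]
      norm_num
    rw [hsplit]
    simp only [List.foldl_cons]
    exact ih (by omega) _ (pvColStepB_mix fs ds ps t c (by omega) st h)

-- one full row step: from "row t done" to "row t+1 done"
theorem pvRowB_full (fs ds ps : List Int) (t : Nat) (st : PvStB)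
    (h : pvMixB fs ds ps t ds.length st) :
    pvMixB fs ds ps (t + 1) ds.length
      ((PySem.List.pyRange ((ds.length : Nat) : Int) 0 (-1)).foldl
        (pvColStepB ds (fs.getD t 0) (ps.getD t 0) ((t : Int) + 1)) st) := by
  have h0 := pvRowB_mix fs ds ps t ds.length le_rfl st h
  obtain ⟨hl1, hl2, hl3, hl4, hold, hnew⟩ := h0
  refine ⟨hl1, hl2, hl3, hl4, ?_, fun j hj _ => absurd hj (by omega)⟩
  intro j hj
  cases j with
  | zero =>
    have := hold 0 le_rfl
    rw [pvBest_zero', pvPath_zero'] at this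
    rw [pvBest_zero', pvPath_zero']
    exact this
  | succ j => exact hnew (j + 1) (by omega) hj

-- the outer fold invariant
theorem pvRunB_inv (fs ds ps : List Int) (hpre : fs.length ≤ ps.length) :
    ∀ t : Nat, t ≤ fs.length →
      (((fs.zip ps).take t).foldl
        (fun acc fp =>
          ((PySem.List.pyRange ((ds.length : Int)) 0 (-1)).foldl
            (pvColStepB ds fp.1 fp.2 acc.2) acc.1,
           acc.2 + 1))
        ({ vals := List.replicate (ds.length + 1) (0 : Int),
           sols := List.replicate (ds.length + 1) (-1 : Int),
           pf := [], pd := [], par := [] }, 1)).2 = (t : Int) + 1 ∧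
      pvMixB fs ds ps t ds.length
        (((fs.zip ps).take t).foldl
          (fun acc fp =>
            ((PySem.List.pyRange ((ds.length : Int)) 0 (-1)).foldl
              (pvColStepB ds fp.1 fp.2 acc.2) acc.1,
             acc.2 + 1))
          ({ vals := List.replicate (ds.length + 1) (0 : Int),
             sols := List.replicate (ds.length + 1) (-1 : Int),
             pf := [], pd := [], par := [] }, 1)).1 := by
  intro t
  induction t with
  | zero =>
    intro _
    refine ⟨by simp, by simp, by simp, by simp, by simp, ?_, fun j hj hj2 => absurd hj (by omega)⟩
    intro j hj
    simp only [List.take_zero, List.foldl_nil]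
    constructor
    · rw [List.getD_eq_getElem _ _ (by simp; omega), List.getElem_replicate, pvBest_zero]
    · rw [List.getD_eq_getElem _ _ (by simp; omega), List.getElem_replicate, pvPath_zero]
      rfl
  | succ t ih =>
    intro ht
    have hzlen : (fs.zip ps).length = fs.length := by
      rw [List.length_zip]; omega
    have htz : t < (fs.zip ps).length := by omega
    have hsplit : (fs.zip ps).take (t + 1) = (fs.zip ps).take t ++ [(fs.zip ps)[t]] := by
      rw [List.take_add_one, List.getElem?_eq_getElem htz]
      rfl
    obtain ⟨ih1, ih2⟩ := ih (by omega)
    have hget : (fs.zip ps)[t] = (fs.getD t 0, ps.getD t 0) := by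
      rw [List.getElem_zip]
      rw [List.getD_eq_getElem _ _ (by omega), List.getD_eq_getElem _ _ (by omega)]
    rw [hsplit, List.foldl_append]
    simp only [List.foldl_cons, List.foldl_nil, hget]
    constructor
    · simp only [ih1]; push_cast; ring
    · rw [ih1]
      exact pvRowB_full fs ds ps t _ ih2

-- ===== VERDICT (by name: the statement is the Claim_ definition above) =====
theorem multiple_knapsack_with_priority_spec : Claim_equal_multiple_knapsack_with_priority := by
  intro fs ds ps _ hpre
  unfold Spec_multiple_knapsack_with_priority
  unfold multiple_knapsack_with_priority multiple_knapsack_with_priority_alt pvRunB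
  simp only
  have hfull : (fs.zip ps).take fs.length = fs.zip ps := by
    apply List.take_of_length_le
    rw [List.length_zip]; omega
  have hinv := pvRunB_inv fs ds ps hpre fs.length le_rfl
  rw [hfull] at hinv
  obtain ⟨-, hl1, hl2, hl3, hl4, hold, -⟩ := hinv
  have hchain := (hold ds.length le_rfl).2
  have key : ∀ (pf pd par : List Int) (k : Int) (L : List (Int × Int)),
      pvChainOK pf pd par k L → L.length < par.length + 1 := by
    intro pf pd par k L h
    have h1 := pvChainOK_len pf pd par L k h
    have h2 := pvChainOK_head_lt pf pd par k L h
    omega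
  refine Prod.ext ?_ ?_ <;> dsimp only
  · rw [pvDpA_getD fs ds ps fs.length ds.length le_rfl le_rfl,
        PySem.List.pyGetD_natCast]
    exact ((hold ds.length le_rfl).1).symm
  · rw [pvBackA_eq_path fs ds ps fs.length ds.length [] le_rfl le_rfl,
        PySem.List.pyGetD_natCast,
        pvWhileB_eq _ _ _ _ _ hchain _ [] (key _ _ _ _ _ hchain)]
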